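-- pv_equiv track=rewrite | github.com/PennyLIN2016/Programming | 260_SingleNumber3.py | singleNumber3
-- ===== SOURCE A (Python) =====
-- def singleNumber3(nums):
--     """
--     :type nums: List[int]
--     :rtype: List[int]
--     """
--     # Runtime: 48 ms, faster than 60.45% of Python online submissions for Single Number III.
--     # Memory Usage: 14.8 MB, less than 7.14% of Python online submissions for Single Number
--     #runtime: o(len(nums)/2) space: len(res) = 2 + counter(n/2)
--     import collections
--     res=[]
--     count_nums= collections.Counter(nums)
--     for value,time in count_nums.items():
--         if time==1:
--             res.append(value)
--     return res
-- ===== SOURCE B (Python) =====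
-- def singleNumber3(nums):
--     """
--     :type nums: List[int]
--     :rtype: List[int]
--     """
--     # No counting at all: one forward pass keeping a list of current
--     # candidates; on an element's second occurrence it is deleted from the
--     # candidates and blacklisted in dups so later occurrences are skipped.
--     # Elements left in the candidate list at the end are exactly those seen
--     # once, in first-occurrence order.
--     res = []
--     dups = set()
--     for x in nums:
--         if x in dups:
--             continue
--         if x in res:
--             res.remove(x)
--             dups.add(x)
--         else:
--             res.append(x)
--     return res
-- ===== Notes on version B (the rewrite author's own statement) =====
-- stated objective: alternative
-- what changed: B never counts occurrences: it does a single forward pass maintaining a candidate list and a duplicate blacklist, deleting a candidate on its second occurrence, so the survivors are the once-only elements in first-occurrence order.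
import Mathlib
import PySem

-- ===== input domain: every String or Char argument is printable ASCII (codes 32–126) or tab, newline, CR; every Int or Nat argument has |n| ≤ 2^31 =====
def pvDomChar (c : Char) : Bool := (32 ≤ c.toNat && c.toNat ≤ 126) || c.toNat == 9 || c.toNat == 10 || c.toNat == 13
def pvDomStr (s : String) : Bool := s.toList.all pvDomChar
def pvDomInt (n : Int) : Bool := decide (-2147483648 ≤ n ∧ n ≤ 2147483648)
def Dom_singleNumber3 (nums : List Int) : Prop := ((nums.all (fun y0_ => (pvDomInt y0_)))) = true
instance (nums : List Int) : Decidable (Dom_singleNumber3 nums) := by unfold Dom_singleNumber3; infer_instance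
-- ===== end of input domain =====

-- B replaces A's counting pass (Counter + filter time==1) by a count-free single pass that
-- deletes a candidate from the result list on its second occurrence; same return value.
-- ===== PORT A =====
-- res=[]; for value,time in Counter(nums).items(): if time==1: res.append(value)
def singleNumber3 (nums : List Int) : List Int :=
  ((PySem.Dict.counter nums).items).foldl
    (fun res vt => if vt.2 = 1 then res ++ [vt.1] else res) []

-- ===== PORT B =====
-- res=[]; dups=set(); for x in nums: if x in dups: continue; elif x in res: res.remove(x); dups.add(x); else res.append(x)
-- (res.remove(x) is List.erase: first occurrence, and presence is guarded just before)
def singleNumber3_alt (nums : List Int) : List Int :=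
  (nums.foldl
    (fun (st : List Int × PySem.Set Int) x =>
      if PySem.Set.contains st.2 x then st
      else if st.1.contains x then (st.1.erase x, PySem.Set.add st.2 x)
      else (st.1 ++ [x], st.2))
    ([], PySem.Set.empty)).1

-- ===== PRECONDITION & SPEC =====
def Spec_singleNumber3 (nums : List Int) (out : List Int) : Prop := out = singleNumber3_alt nums
instance (nums : List Int) (out : List Int) : Decidable (Spec_singleNumber3 nums out) := by unfold Spec_singleNumber3; infer_instance

-- ===== CLAIM (what is proved, stated in full; the proofs are below) =====
def Claim_equal_singleNumber3 : Prop := ∀ (nums : List Int), Dom_singleNumber3 nums → Spec_singleNumber3 nums (singleNumber3 nums)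

-- ===== LEMMAS AND PROOFS =====

theorem discard_eq_filter (s : List Int) (a : Int) :
    PySem.Set.discard s a = s.filter (fun y => !(y == a)) := by
  simp [PySem.Set.discard]

-- B's loop, characterised: surviving old candidates (those not met again in t)
-- followed by the fresh once-only elements of t, in first-occurrence order.
theorem loopB : ∀ (t res dups : List Int), res.Nodup → (∀ x ∈ dups, x ∉ res) →
    (t.foldl
      (fun (st : List Int × PySem.Set Int) x =>
        if PySem.Set.contains st.2 x then st
        else if st.1.contains x then (st.1.erase x, PySem.Set.add st.2 x)
        else (st.1 ++ [x], st.2))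
      (res, dups)).1
    = res.filter (fun x => decide (x ∉ t))
      ++ (PySem.Set.ofList t).filter (fun x => decide (x ∉ dups ∧ x ∉ res ∧ t.count x = 1)) := by
  intro t
  induction t with
  | nil => intro res dups _ _; simp
  | cons a t ih =>
    intro res dups hnd hdisj
    simp only [List.foldl_cons]
    by_cases had : a ∈ dups
    · -- a already blacklisted: state unchanged
      have hca : PySem.Set.contains dups a = true := by simpa using had
      rw [if_pos hca, ih res dups hnd hdisj]
      have hanr : a ∉ res := hdisj a had
      congr 1
      · exact List.filter_congr (fun x hx => by
          have : x ≠ a := fun h => hanr (h ▸ hx)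
          simp [this])
      · rw [PySem.Set.ofList_cons, discard_eq_filter]
        have hpa : (decide (a ∉ dups ∧ a ∉ res ∧ (a :: t).count a = 1)) = false := by
          simp [had]
        simp only [List.filter_cons, hpa, List.filter_filter, Bool.false_eq_true, if_false]
        exact List.filter_congr (fun x hx => by
          by_cases hxa : x = a
          · subst hxa; simp [had]
          · simp [hxa, show ¬ a = x from fun h => hxa h.symm])
    · have hca : ¬ PySem.Set.contains dups a = true := by simpa using had
      rw [if_neg hca]
      by_cases har : a ∈ res
      · -- second occurrence: delete candidate, blacklist a
        rw [if_pos (by simpa using har)]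
        have hnd' : (res.erase a).Nodup := hnd.erase a
        have hdisj' : ∀ x ∈ PySem.Set.add dups a, x ∉ res.erase a := by
          intro x hx
          rcases (PySem.Set.mem_add dups a x).mp hx with hx | hx
          · exact fun h => hdisj x hx (List.mem_of_mem_erase h)
          · subst hx; exact hnd.not_mem_erase
        rw [ih (res.erase a) (PySem.Set.add dups a) hnd' hdisj']
        have herase : res.erase a = res.filter (fun y => !(y == a)) := by
          simpa using hnd.erase_eq_filter a
        congr 1
        · rw [herase, List.filter_filter]
          exact (List.filter_congr (fun x hx => by
            by_cases hxa : x = a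
            · subst hxa; simp
            · simp [hxa])).symm
        · rw [PySem.Set.ofList_cons, discard_eq_filter]
          have hpa : (decide (a ∉ dups ∧ a ∉ res ∧ (a :: t).count a = 1)) = false := by
            simp [har]
          simp only [List.filter_cons, hpa, List.filter_filter, Bool.false_eq_true, if_false]
          refine (List.filter_congr (fun x hx => ?_)).symm
          by_cases hxa : x = a
          · subst hxa; simp
          · have h1 : x ∈ PySem.Set.add dups a ↔ x ∈ dups := by
              rw [PySem.Set.mem_add]; simp [hxa]
            have h2 : x ∈ res.erase a ↔ x ∈ res := by
              rw [herase]; simp [hxa]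
            simp [hxa, show ¬ a = x from fun h => hxa h.symm, h1, h2]
      · -- first occurrence: append candidate
        rw [if_neg (by simpa using har)]
        have hnd' : (res ++ [a]).Nodup := by
          rw [List.nodup_append]
          refine ⟨hnd, List.nodup_singleton a, ?_⟩
          intro y hy z hz
          simp only [List.mem_singleton] at hz
          subst hz
          exact fun h => har (h ▸ hy)
        have hdisj' : ∀ x ∈ dups, x ∉ res ++ [a] := by
          intro x hx
          simp only [List.mem_append, List.mem_singleton]
          rintro (h | rfl)
          · exact hdisj x hx h
          · exact had hx
        rw [ih (res ++ [a]) dups hnd' hdisj']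
        by_cases hat : a ∈ t
        · -- a recurs later: it will be deleted inside t; count in a::t is ≥ 2
          have hpa : (decide (a ∉ dups ∧ a ∉ res ∧ (a :: t).count a = 1)) = false := by
            have h1 : (a :: t).count a = t.count a + 1 := List.count_cons_self
            have h2 : 1 ≤ t.count a := List.one_le_count_iff.mpr hat
            simp only [decide_eq_false_iff_not]
            rintro ⟨-, -, hc⟩; omega
          rw [PySem.Set.ofList_cons, discard_eq_filter]
          simp only [List.filter_append, List.filter_cons, hpa, List.filter_filter,
            List.filter_nil, Bool.false_eq_true, if_false]
          rw [if_neg (by simp [hat]), List.append_nil]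
          congr 1
          · exact (List.filter_congr (fun x hx => by
              have hxa : x ≠ a := fun h => har (h ▸ hx)
              simp [hxa])).symm
          · refine (List.filter_congr (fun x hx => ?_)).symm
            by_cases hxa : x = a
            · subst hxa; simp
            · simp [hxa, show ¬ a = x from fun h => hxa h.symm]
        · -- a occurs exactly once overall: it survives at the junction position
          have hpa : (decide (a ∉ dups ∧ a ∉ res ∧ (a :: t).count a = 1)) = true := by
            have hc : (a :: t).count a = 1 := by
              have h0 : t.count a = 0 := List.count_eq_zero.mpr hat
              simp [List.count_cons_self, h0]
            simp [had, har, hc]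
          rw [PySem.Set.ofList_cons, discard_eq_filter]
          simp only [List.filter_append, List.filter_cons, hpa, List.filter_filter,
            List.filter_nil, if_true]
          rw [if_pos (by simp [hat]), List.append_assoc]
          congr 1
          · exact (List.filter_congr (fun x hx => by
              have hxa : x ≠ a := fun h => har (h ▸ hx)
              simp [hxa])).symm
          · simp only [List.singleton_append]
            congr 1
            refine (List.filter_congr (fun x hx => ?_)).symm
            have hxa : x ≠ a := by
              have := (PySem.Set.mem_ofList t x).mp hx
              exact fun h => hat (h ▸ this)
            simp [hxa, show ¬ a = x from fun h => hxa h.symm]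

-- ===== VERDICT (by name: the statement is the Claim_ definition above) =====
theorem singleNumber3_spec : Claim_equal_singleNumber3 := by
  intro nums _
  unfold Spec_singleNumber3 singleNumber3 singleNumber3_alt
  rw [PySem.Dict.items_counter,
      PySem.List.foldl_append_ite (fun vt : Int × Int => vt.2 = 1) (fun vt => vt.1),
      loopB nums [] PySem.Set.empty List.nodup_nil (by simp [PySem.Set.empty])]
  simp only [List.filter_map, List.map_map, Function.comp_def, List.filter_nil,
    List.nil_append, List.not_mem_nil, not_false_eq_true, true_and]
  have h : (fun k : Int => decide ((nums.count k : Int) = 1))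
       = (fun x : Int => decide (x ∉ PySem.Set.empty ∧ nums.count x = 1)) := by
    funext x
    by_cases hx : nums.count x = 1 <;> simp [hx, PySem.Set.empty]
  rw [h]
  simp
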